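-- pv_equiv track=rewrite | github.com/Vitoria-Maria0912/Grafos | EP02/Questões/mfs_greedy.py | encontrar_ciclos_minimos_dependencia
-- ===== SOURCE A (Python) =====
-- def encontrar_ciclos_minimos_dependencia(ddc):
--     arcos_ciclos = []  # Lista para armazenar as arestas dos ciclos mínimos de dependência
--     ciclos = []  # Lista para armazenar os ciclos mínimos de dependência
--
--     def dfs(no, visitados, caminho):
--         visitados.add(no)
--         caminho.append(no)
--
--         for vizinho in ddc[no]:
--             if vizinho in caminho:
--                 indice_vizinho = caminho.index(vizinho)
--                 ciclo = caminho[indice_vizinho:]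
--                 if ciclo not in ciclos:  # Evita ciclos duplicados
--                     ciclos.append(ciclo)
--             elif vizinho not in visitados:
--                 dfs(vizinho, visitados, caminho)
--
--         caminho.pop()
--         visitados.remove(no)
--
--     visitados = set()
--
--     for node in ddc:
--         if node not in visitados:
--             dfs(node, visitados, [])
--
--     for ciclo in ciclos:
--         # Verifica se o ciclo é completo
--         if len(ciclo) < len(ddc) and len(set(ciclo)) == len(ciclo):
--             arcos_ciclo = [(ciclo[i], ciclo[i + 1]) for i in range(len(ciclo) - 1)]
--             arco_final = (ciclo[-1], ciclo[0])
--             arcos_ciclo.append(arco_final)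
--             arcos_ciclos.append(arcos_ciclo)
--
--     return arcos_ciclos
-- ===== SOURCE B (Python) =====
-- def encontrar_ciclos_minimos_dependencia(ddc):
--     # Pure recursive path extension: no 'visitados' set, cycles collected as a
--     # returned stream, deduplicated in a single separate pass; arcs built with zip.
--     def cycles_from(caminho):
--         encontrados = []
--         for vizinho in ddc[caminho[-1]]:
--             if vizinho in caminho:
--                 encontrados.append(caminho[caminho.index(vizinho):])
--             else:
--                 encontrados.extend(cycles_from(caminho + [vizinho]))
--         return encontrados
--
--     ciclos = []
--     for raiz in ddc:
--         for ciclo in cycles_from([raiz]):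
--             if ciclo not in ciclos:
--                 ciclos.append(ciclo)
--
--     return [list(zip(c, c[1:] + c[:1]))
--             for c in ciclos
--             if len(c) < len(ddc) and len(set(c)) == len(c)]
-- ===== Notes on version B (the rewrite author's own statement) =====
-- stated objective: alternative
-- what changed: Replaces A's nested dfs that mutates a shared visitados set, caminho list and ciclos accumulator by a pure recursive path-extension function returning the stream of cycles (the visitados set disappears entirely), with deduplication done in a single separate pass and the arc lists built by zipping the cycle with its rotation instead of an index loop.
import Mathlib
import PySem

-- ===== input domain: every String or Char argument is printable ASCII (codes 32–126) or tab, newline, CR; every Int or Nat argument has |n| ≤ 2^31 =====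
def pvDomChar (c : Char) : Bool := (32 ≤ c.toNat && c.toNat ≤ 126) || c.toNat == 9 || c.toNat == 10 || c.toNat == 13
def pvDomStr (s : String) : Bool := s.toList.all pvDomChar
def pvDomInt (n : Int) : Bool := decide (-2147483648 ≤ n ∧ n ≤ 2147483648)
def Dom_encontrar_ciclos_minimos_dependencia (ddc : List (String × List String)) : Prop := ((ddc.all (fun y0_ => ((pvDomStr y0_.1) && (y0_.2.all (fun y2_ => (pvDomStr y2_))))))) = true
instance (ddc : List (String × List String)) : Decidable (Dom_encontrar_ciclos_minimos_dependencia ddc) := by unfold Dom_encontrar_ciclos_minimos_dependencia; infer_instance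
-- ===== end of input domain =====

-- B replaces A's mutating DFS (shared visitados set, in-place caminho/ciclos) by a pure
-- recursive path-extension returning the cycle stream, dedup in a separate pass, arcs via zip
-- (objective: alternative decomposition, same asymptotic cost).


-- ===== PORT A =====
-- dfs(no, visitados, caminho) threading the mutated state (visitados, caminho, ciclos);
-- fuel (strictly larger than any reachable recursion depth) only makes the recursion structural.
def pvDfsA (d : PySem.Dict String (List String)) (fuel : Nat) (no : String)
    (vis : PySem.Set String) (caminho : List String) (ciclos : List (List String)) :
    PySem.Set String × List String × List (List String) :=
  match fuel with
  | 0 => (vis, caminho, ciclos)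
  | fuel + 1 =>
    let vis1 := PySem.Set.add vis no
    let caminho1 := caminho ++ [no]
    let st := (d.getD no []).foldl (fun st viz =>
        match st with
        | (vis, caminho, ciclos) =>
          if viz ∈ caminho then
            let ciclo := PySem.List.slice caminho
              (some (((PySem.List.index? caminho viz).getD 0 : Nat) : Int)) none
            if ciclo ∈ ciclos then (vis, caminho, ciclos)
            else (vis, caminho, ciclos ++ [ciclo])
          else if PySem.Set.contains vis viz then (vis, caminho, ciclos)
          else pvDfsA d fuel viz vis caminho ciclos) (vis1, caminho1, ciclos)
    (PySem.Set.discard st.1 no, st.2.1.dropLast, st.2.2)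

def encontrar_ciclos_minimos_dependencia (ddc : List (String × List String)) : List (List (String × String)) :=
  let d := PySem.Dict.ofList ddc
  let fin := d.keys.foldl (fun st node =>
      if PySem.Set.contains st.1 node then st
      else
        let r := pvDfsA d (d.size + 2) node st.1 [] st.2
        (r.1, r.2.2)) ((PySem.Set.empty : PySem.Set String), ([] : List (List String)))
  fin.2.foldl (fun acc ciclo =>
      if ciclo.length < d.size ∧ (PySem.Set.ofList ciclo).length = ciclo.length then
        acc ++ [((PySem.List.pyRange 0 ((ciclo.length : Int) - 1) 1).map (fun i =>
              (PySem.List.pyGetD ciclo i "", PySem.List.pyGetD ciclo (i + 1) "")))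
            ++ [(PySem.List.pyGetD ciclo (-1) "", PySem.List.pyGetD ciclo 0 "")]]
      else acc) []

-- ===== PORT B =====
-- cycles_from(caminho): pure recursion returning the stream of recorded cycles; fuel as above.
def pvCyclesFromB (d : PySem.Dict String (List String)) (fuel : Nat) (caminho : List String) :
    List (List String) :=
  match fuel with
  | 0 => []
  | fuel + 1 =>
    (d.getD (PySem.List.pyGetD caminho (-1) "") []).foldl (fun acc viz =>
      if viz ∈ caminho then
        acc ++ [PySem.List.slice caminho
          (some (((PySem.List.index? caminho viz).getD 0 : Nat) : Int)) none]
      else acc ++ pvCyclesFromB d fuel (caminho ++ [viz])) []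

def encontrar_ciclos_minimos_dependencia_alt (ddc : List (String × List String)) : List (List (String × String)) :=
  let d := PySem.Dict.ofList ddc
  let ciclos := d.keys.foldl (fun cic raiz =>
      (pvCyclesFromB d (d.size + 2) [raiz]).foldl
        (fun cic c => if c ∈ cic then cic else cic ++ [c]) cic) []
  (ciclos.filter (fun c =>
      decide (c.length < d.size) && ((PySem.Set.ofList c).length == c.length))).map
    (fun c => c.zip (PySem.List.slice c (some 1) none ++ PySem.List.slice c none (some 1)))

-- ===== PRECONDITION & SPEC =====
-- Pre_ excludes exactly the inputs on which A raises KeyError: some listed neighbour is not a key.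
def Pre_encontrar_ciclos_minimos_dependencia (ddc : List (String × List String)) : Prop :=
  ∀ p ∈ (PySem.Dict.ofList ddc).items, ∀ v ∈ p.2, (PySem.Dict.ofList ddc).contains v = true
instance (ddc : List (String × List String)) : Decidable (Pre_encontrar_ciclos_minimos_dependencia ddc) := by unfold Pre_encontrar_ciclos_minimos_dependencia; infer_instance
def pvWitness_encontrar_ciclos_minimos_dependencia : (List (String × List String)) :=
  [("a", ["b", "a"]), ("b", ["a"])]
def Spec_encontrar_ciclos_minimos_dependencia (ddc : List (String × List String)) (out : List (List (String × String))) : Prop := out = encontrar_ciclos_minimos_dependencia_alt ddc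
instance (ddc : List (String × List String)) (out : List (List (String × String))) : Decidable (Spec_encontrar_ciclos_minimos_dependencia ddc out) := by unfold Spec_encontrar_ciclos_minimos_dependencia; infer_instance

-- ===== CLAIM (what is proved, stated in full; the proofs are below) =====
def Claim_equal_encontrar_ciclos_minimos_dependencia : Prop := ∀ (ddc : List (String × List String)), Dom_encontrar_ciclos_minimos_dependencia ddc → Pre_encontrar_ciclos_minimos_dependencia ddc → Spec_encontrar_ciclos_minimos_dependencia ddc (encontrar_ciclos_minimos_dependencia ddc)

-- ===== LEMMAS AND PROOFS =====

def pvIns (cic : List (List String)) (c : List String) : List (List String) :=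
  if c ∈ cic then cic else cic ++ [c]

theorem pvGetD_neg_one_append {α : Type} (l : List α) (x : α) (d : α) :
    PySem.List.pyGetD (l ++ [x]) (-1) d = x := by
  simp [PySem.List.pyGetD, PySem.List.pyGet?, PySem.List.pyIdx?]

theorem pvCyclesFromB_succ (d : PySem.Dict String (List String)) (fuel : Nat)
    (caminho : List String) :
    pvCyclesFromB d (fuel + 1) caminho =
      (d.getD (PySem.List.pyGetD caminho (-1) "") []).flatMap (fun viz =>
        if viz ∈ caminho then
          [PySem.List.slice caminho
            (some (((PySem.List.index? caminho viz).getD 0 : Nat) : Int)) none]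
        else pvCyclesFromB d fuel (caminho ++ [viz])) := by
  show (d.getD (PySem.List.pyGetD caminho (-1) "") []).foldl _ [] = _
  have hstep : (fun (acc : List (List String)) viz =>
      if viz ∈ caminho then
        acc ++ [PySem.List.slice caminho
          (some (((PySem.List.index? caminho viz).getD 0 : Nat) : Int)) none]
      else acc ++ pvCyclesFromB d fuel (caminho ++ [viz])) =
      (fun acc viz => acc ++ (if viz ∈ caminho then
          [PySem.List.slice caminho
            (some (((PySem.List.index? caminho viz).getD 0 : Nat) : Int)) none]
        else pvCyclesFromB d fuel (caminho ++ [viz]))) := by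
    funext acc viz; split <;> rfl
  rw [hstep, PySem.List.foldl_append_eq_flatMap]
  rfl

theorem pvCyclesFromB_ne_nil (d : PySem.Dict String (List String)) (fuel : Nat) :
    ∀ (caminho : List String) (c : List String), c ∈ pvCyclesFromB d fuel caminho → c ≠ [] := by
  induction fuel with
  | zero => intro caminho c hc; simp [pvCyclesFromB] at hc
  | succ fuel ih =>
    intro caminho c hc
    rw [pvCyclesFromB_succ] at hc
    rw [List.mem_flatMap] at hc
    obtain ⟨viz, _, hc⟩ := hc
    by_cases hv : viz ∈ caminho
    · simp only [if_pos hv, List.mem_singleton] at hc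
      subst hc
      obtain ⟨i, hi⟩ := Option.isSome_iff_exists.1 ((PySem.List.index?_isSome_iff caminho viz).2 hv)
      obtain ⟨hlt, -, -⟩ := PySem.List.getElem_of_index?_eq_some hi
      rw [hi] at *
      simp only [Option.getD_some]
      rw [PySem.List.slice_from_natCast]
      intro hnil
      rw [List.drop_eq_nil_iff] at hnil
      omega
    · simp only [if_neg hv] at hc
      exact ih _ _ hc

theorem pvMem_foldl_pvIns (s : List (List String)) :
    ∀ (cic : List (List String)) (c : List String),
      c ∈ List.foldl pvIns cic s → c ∈ cic ∨ c ∈ s := by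
  induction s with
  | nil => intro cic c h; exact Or.inl h
  | cons x s ih =>
    intro cic c h
    rcases ih (pvIns cic x) c h with h' | h'
    · unfold pvIns at h'
      split at h'
      · exact Or.inl h'
      · rcases List.mem_append.1 h' with h'' | h''
        · exact Or.inl h''
        · rw [List.mem_singleton.1 h'']; exact Or.inr List.mem_cons_self
    · exact Or.inr (List.mem_cons_of_mem _ h')

theorem pvDiscard_append {s : PySem.Set String} {no : String} (h : no ∉ s) :
    PySem.Set.discard (s ++ [no]) no = s := by
  simp [PySem.Set.discard, List.filter_append]
  intro a ha e
  exact h (e ▸ ha)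

def pvStepA (d : PySem.Dict String (List String)) (fuel : Nat) :
    PySem.Set String × List String × List (List String) → String →
      PySem.Set String × List String × List (List String)
  | (vis, caminho, ciclos), viz =>
    if viz ∈ caminho then
      let ciclo := PySem.List.slice caminho
        (some (((PySem.List.index? caminho viz).getD 0 : Nat) : Int)) none
      if ciclo ∈ ciclos then (vis, caminho, ciclos)
      else (vis, caminho, ciclos ++ [ciclo])
    else if PySem.Set.contains vis viz then (vis, caminho, ciclos)
    else pvDfsA d fuel viz vis caminho ciclos

theorem pvStepA_eq (d : PySem.Dict String (List String)) (fuel : Nat) :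
    (fun (st : PySem.Set String × List String × List (List String)) viz =>
      match st with
      | (vis, caminho, ciclos) =>
        if viz ∈ caminho then
          let ciclo := PySem.List.slice caminho
            (some (((PySem.List.index? caminho viz).getD 0 : Nat) : Int)) none
          if ciclo ∈ ciclos then (vis, caminho, ciclos)
          else (vis, caminho, ciclos ++ [ciclo])
        else if PySem.Set.contains vis viz then (vis, caminho, ciclos)
        else pvDfsA d fuel viz vis caminho ciclos) = pvStepA d fuel := by
  funext st viz
  obtain ⟨a, b, c⟩ := st
  rfl

theorem pvDfsA_eq (d : PySem.Dict String (List String)) (fuel : Nat) :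
    ∀ (no : String) (vis : PySem.Set String) (caminho : List String)
      (ciclos : List (List String)),
      (∀ x, x ∈ vis ↔ x ∈ caminho) → no ∉ caminho →
      pvDfsA d fuel no vis caminho ciclos =
        (vis, caminho, List.foldl pvIns ciclos (pvCyclesFromB d fuel (caminho ++ [no]))) := by
  induction fuel with
  | zero => intro no vis caminho ciclos _ _; simp [pvDfsA, pvCyclesFromB]
  | succ fuel ih =>
    intro no vis caminho ciclos hinv hno
    have hnovis : no ∉ vis := fun h => hno ((hinv no).1 h)
    have hadd : PySem.Set.add vis no = vis ++ [no] := PySem.Set.add_of_not_mem hnovis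
    have hinv1 : ∀ x, x ∈ PySem.Set.add vis no ↔ x ∈ caminho ++ [no] := by
      intro x
      rw [PySem.Set.mem_add, List.mem_append, List.mem_singleton, hinv x]
    have hlast : PySem.List.pyGetD (caminho ++ [no]) (-1) "" = no :=
      pvGetD_neg_one_append _ _ _
    rw [pvCyclesFromB_succ, hlast]
    show (let st := (d.getD no []).foldl _ (PySem.Set.add vis no, caminho ++ [no], ciclos);
      (PySem.Set.discard st.1 no, st.2.1.dropLast, st.2.2)) = _
    rw [pvStepA_eq d fuel]
    have inner : ∀ (ns : List String) (cic : List (List String)),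
        ns.foldl (pvStepA d fuel) (PySem.Set.add vis no, caminho ++ [no], cic) =
        (PySem.Set.add vis no, caminho ++ [no],
          List.foldl pvIns cic (ns.flatMap (fun viz =>
            if viz ∈ caminho ++ [no] then
              [PySem.List.slice (caminho ++ [no])
                (some (((PySem.List.index? (caminho ++ [no]) viz).getD 0 : Nat) : Int)) none]
            else pvCyclesFromB d fuel (caminho ++ [no] ++ [viz])))) := by
      intro ns
      induction ns with
      | nil => intro cic; simp
      | cons viz ns ihns =>
        intro cic
        rw [List.foldl_cons, List.flatMap_cons]
        by_cases hviz : viz ∈ caminho ++ [no]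
        · have hstep : pvStepA d fuel (PySem.Set.add vis no, caminho ++ [no], cic) viz =
              (PySem.Set.add vis no, caminho ++ [no],
                pvIns cic (PySem.List.slice (caminho ++ [no])
                  (some (((PySem.List.index? (caminho ++ [no]) viz).getD 0 : Nat) : Int)) none)) := by
            simp only [pvStepA]
            rw [if_pos hviz]
            unfold pvIns
            split <;> rfl
          rw [hstep, ihns, List.foldl_append, if_pos hviz]
          rfl
        · have hcont : PySem.Set.contains (PySem.Set.add vis no) viz = false := by
            rw [← Bool.not_eq_true]
            intro h
            exact hviz ((hinv1 viz).1 ((PySem.Set.contains_iff _ _).1 h))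
          have hstep : pvStepA d fuel (PySem.Set.add vis no, caminho ++ [no], cic) viz =
              (PySem.Set.add vis no, caminho ++ [no],
                List.foldl pvIns cic (pvCyclesFromB d fuel (caminho ++ [no] ++ [viz]))) := by
            simp only [pvStepA]
            rw [if_neg hviz, hcont]
            show pvDfsA d fuel viz (PySem.Set.add vis no) (caminho ++ [no]) cic = _
            exact ih viz _ _ cic hinv1 hviz
          rw [hstep, ihns, List.foldl_append, if_neg hviz]
    rw [inner]
    show (PySem.Set.discard (PySem.Set.add vis no) no, (caminho ++ [no]).dropLast, _) = _
    rw [hadd, pvDiscard_append hnovis, List.dropLast_concat]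

def pvStepOut (d : PySem.Dict String (List String)) :
    PySem.Set String × List (List String) → String → PySem.Set String × List (List String) :=
  fun st node =>
    if PySem.Set.contains st.1 node then st
    else
      let r := pvDfsA d (d.size + 2) node st.1 [] st.2
      (r.1, r.2.2)

theorem pvOuter_eq (d : PySem.Dict String (List String)) (keys : List String) :
    ∀ cic : List (List String),
      keys.foldl (fun st node =>
          if PySem.Set.contains st.1 node then st
          else
            let r := pvDfsA d (d.size + 2) node st.1 [] st.2
            (r.1, r.2.2)) ((PySem.Set.empty : PySem.Set String), cic) =
        (PySem.Set.empty,
          keys.foldl (fun cic raiz =>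
            (pvCyclesFromB d (d.size + 2) [raiz]).foldl pvIns cic) cic) := by
  have hf : (fun (st : PySem.Set String × List (List String)) node =>
      if PySem.Set.contains st.1 node then st
      else
        let r := pvDfsA d (d.size + 2) node st.1 [] st.2
        (r.1, r.2.2)) = pvStepOut d := rfl
  rw [hf]
  induction keys with
  | nil => intro cic; rfl
  | cons node keys ih =>
    intro cic
    rw [List.foldl_cons, List.foldl_cons]
    have hstep : pvStepOut d ((PySem.Set.empty : PySem.Set String), cic) node =
        ((PySem.Set.empty : PySem.Set String),
          (pvCyclesFromB d (d.size + 2) [node]).foldl pvIns cic) := by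
      show (if PySem.Set.contains (PySem.Set.empty : PySem.Set String) node then _ else _) = _
      rw [if_neg (by simp [PySem.Set.contains_eq_listContains, PySem.Set.empty])]
      show ((pvDfsA d (d.size + 2) node PySem.Set.empty [] cic).1,
        (pvDfsA d (d.size + 2) node PySem.Set.empty [] cic).2.2) = _
      rw [pvDfsA_eq d _ node PySem.Set.empty [] cic (by simp [PySem.Set.empty]) (by simp)]
      rfl
    rw [hstep, ih]

theorem pvMem_outerB (d : PySem.Dict String (List String)) (keys : List String) :
    ∀ (cic : List (List String)) (c : List String),
      c ∈ keys.foldl (fun cic raiz =>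
          (pvCyclesFromB d (d.size + 2) [raiz]).foldl pvIns cic) cic →
        c ∈ cic ∨ ∃ raiz, c ∈ pvCyclesFromB d (d.size + 2) [raiz] := by
  induction keys with
  | nil => intro cic c h; exact Or.inl h
  | cons raiz keys ih =>
    intro cic c h
    rcases ih _ c h with h' | h'
    · rcases pvMem_foldl_pvIns _ _ _ h' with h'' | h''
      · exact Or.inl h''
      · exact Or.inr ⟨raiz, h''⟩
    · exact Or.inr h'

theorem pvNatPairs (c : List String) (d : String) :
    (List.range (c.length - 1)).map (fun k => (c.getD k d, c.getD (k + 1) d)) =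
      c.zip (c.drop 1) := by
  induction c with
  | nil => simp
  | cons a t iht =>
    match t with
    | [] => simp
    | b :: t' =>
      have h1 : (a :: b :: t').length - 1 = t'.length + 1 := by simp
      rw [h1, List.range_succ_eq_map]
      simp only [List.map_cons, List.map_map]
      have h2 : (b :: t').length - 1 = t'.length := by simp
      rw [h2] at iht
      simp only [Function.comp_def, List.getD_cons_succ, List.getD_cons_zero]
      simp only [List.getD_cons_succ, List.drop_succ_cons, List.drop_zero] at iht
      simp only [List.drop_succ_cons, List.drop_zero]
      rw [List.zip_cons_cons, iht]

theorem pvRangePairs_eq_zip (c : List String) (dflt : String) :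
    (PySem.List.pyRange 0 ((c.length : Int) - 1) 1).map (fun i =>
        (PySem.List.pyGetD c i dflt, PySem.List.pyGetD c (i + 1) dflt)) =
      c.zip (c.drop 1) := by
  rw [PySem.List.pyRange_one]
  have h1 : ((c.length : Int) - 1 - 0).toNat = c.length - 1 := by omega
  rw [h1, List.map_map, ← pvNatPairs c dflt]
  apply List.map_congr_left
  intro k _
  have hz : (0 : Int) + (k : Nat) = ((k : Nat) : Int) := by norm_num
  have h3 : ((k : Nat) : Int) + 1 = (((k + 1 : Nat)) : Int) := by push_cast; ring
  show (PySem.List.pyGetD c (0 + (k:Int)) dflt, PySem.List.pyGetD c (0 + (k:Int) + 1) dflt) = _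
  rw [hz, h3, PySem.List.pyGetD_natCast, PySem.List.pyGetD_natCast]

theorem pvZip_rot (l : List String) (a x : String) :
    (a :: l).zip (l ++ [x]) = ((a :: l).zip l) ++ [((a :: l).getLast (by simp), x)] := by
  induction l generalizing a with
  | nil => simp
  | cons b l ih => simp [List.zip_cons_cons] at *; exact ih b

theorem pvArcs_eq (c : List String) (h : c ≠ []) :
    ((PySem.List.pyRange 0 ((c.length : Int) - 1) 1).map (fun i =>
          (PySem.List.pyGetD c i "", PySem.List.pyGetD c (i + 1) "")))
        ++ [(PySem.List.pyGetD c (-1) "", PySem.List.pyGetD c 0 "")] =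
      c.zip (PySem.List.slice c (some 1) none ++ PySem.List.slice c none (some 1)) := by
  obtain ⟨a, l, rfl⟩ : ∃ a l, c = a :: l := by
    cases c with | nil => exact absurd rfl h | cons a l => exact ⟨a, l, rfl⟩
  rw [pvRangePairs_eq_zip]
  have hs1 : PySem.List.slice (a :: l) (some 1) none = l := PySem.List.slice_from_one (a :: l)
  have hs2 : PySem.List.slice (a :: l) none (some 1) = [a] := by
    rw [show (1 : Int) = ((1 : Nat) : Int) from rfl, PySem.List.slice_to_natCast]
    rfl
  rw [hs1, hs2]
  have hm1 : PySem.List.pyGetD (a :: l) (-1) "" = (a :: l).getLast (by simp) := by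
    conv_lhs => rw [← List.dropLast_concat_getLast (l := a :: l) (by simp)]
    exact pvGetD_neg_one_append _ _ _
  have hm0 : PySem.List.pyGetD (a :: l) 0 "" = a := by
    simp [PySem.List.pyGetD, PySem.List.pyGet?, PySem.List.pyIdx?]
  rw [hm1, hm0, pvZip_rot]
  simp [List.drop_succ_cons]

theorem pvFinal_eq (n : Nat) (l : List (List String)) (hne : ∀ c ∈ l, c ≠ []) :
    ∀ acc : List (List (String × String)),
      l.foldl (fun acc ciclo =>
          if ciclo.length < n ∧ (PySem.Set.ofList ciclo).length = ciclo.length then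
            acc ++ [((PySem.List.pyRange 0 ((ciclo.length : Int) - 1) 1).map (fun i =>
                  (PySem.List.pyGetD ciclo i "", PySem.List.pyGetD ciclo (i + 1) "")))
                ++ [(PySem.List.pyGetD ciclo (-1) "", PySem.List.pyGetD ciclo 0 "")]]
          else acc) acc =
        acc ++ (l.filter (fun c =>
            decide (c.length < n) && ((PySem.Set.ofList c).length == c.length))).map
          (fun c => c.zip (PySem.List.slice c (some 1) none ++ PySem.List.slice c none (some 1))) := by
  induction l with
  | nil => intro acc; simp
  | cons c l ih =>
    have hnec : c ≠ [] := hne c List.mem_cons_self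
    have hnel : ∀ c ∈ l, c ≠ [] := fun c hc => hne c (List.mem_cons_of_mem _ hc)
    intro acc
    rw [List.foldl_cons]
    by_cases h : c.length < n ∧ (PySem.Set.ofList c).length = c.length
    · rw [if_pos h, List.filter_cons_of_pos (by simp [h.1, h.2]), List.map_cons,
        ih hnel, pvArcs_eq c hnec, ← List.append_cons]
    · rw [if_neg h, List.filter_cons_of_neg (by simpa using fun h1 h2 => h ⟨h1, h2⟩),
        ih hnel]

-- ===== VERDICT (by name: the statement is the Claim_ definition above) =====
theorem encontrar_ciclos_minimos_dependencia_spec : Claim_equal_encontrar_ciclos_minimos_dependencia := by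
  intro ddc _ _
  unfold Spec_encontrar_ciclos_minimos_dependencia
  unfold encontrar_ciclos_minimos_dependencia encontrar_ciclos_minimos_dependencia_alt
  simp only []
  rw [pvOuter_eq]
  have hne : ∀ c ∈ (PySem.Dict.ofList ddc).keys.foldl (fun cic raiz =>
      (pvCyclesFromB (PySem.Dict.ofList ddc) ((PySem.Dict.ofList ddc).size + 2) [raiz]).foldl pvIns cic) [], c ≠ [] := by
    intro c hc
    rcases pvMem_outerB _ _ _ c hc with h | ⟨raiz, h⟩
    · simp at h
    · exact pvCyclesFromB_ne_nil _ _ _ c h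
  rw [pvFinal_eq _ _ hne]
  rfl
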